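-- pv_equiv track=rewrite | github.com/ElsunNabatov/TTS | datasets/unlabelled_audio.py | split_val_train
-- ===== SOURCE A (Python) =====
-- def split_val_train(paths, mode = "train"):
--     train_audio = []
--     val_audio = []
--     for i in range(len(paths)):
--         if (i%20!=0):
--             train_audio.append(paths[i])
--             #train_tr.append(transcription[i])
--         else:
--             val_audio.append(paths[i])
--             #val_tr.append(transcription[i])
--
--     if(mode =="train"):
--         return train_audio
--     else:
--         return val_audio
-- ===== SOURCE B (Python) =====
-- def split_val_train(paths, mode="train"):
--     if mode == "train":
--         return [p for i, p in enumerate(paths) if i % 20]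
--     return list(paths[::20])
-- ===== Notes on version B (the rewrite author's own statement) =====
-- stated objective: simpler
-- what changed: Branches on mode first and computes only the requested list: the train case is a single filtering comprehension over enumerate, the val case a stride slice paths[::20], instead of A's index loop that builds both lists.
import Mathlib
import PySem

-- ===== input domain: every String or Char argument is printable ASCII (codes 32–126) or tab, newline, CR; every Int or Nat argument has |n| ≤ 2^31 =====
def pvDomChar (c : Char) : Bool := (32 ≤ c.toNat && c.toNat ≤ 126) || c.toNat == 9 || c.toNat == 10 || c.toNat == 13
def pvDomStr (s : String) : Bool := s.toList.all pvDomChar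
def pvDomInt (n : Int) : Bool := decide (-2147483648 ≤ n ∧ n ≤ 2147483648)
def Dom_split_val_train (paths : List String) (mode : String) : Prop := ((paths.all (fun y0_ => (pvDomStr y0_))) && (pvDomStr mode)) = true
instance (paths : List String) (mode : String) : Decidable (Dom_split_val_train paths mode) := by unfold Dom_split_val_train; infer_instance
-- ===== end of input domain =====

-- B branches on mode first and computes only the requested list (a filter of enumerate for train,
-- the stride slice paths[::20] for val) instead of A's index loop that builds both lists.


-- ===== PORT A =====
-- for i in range(len(paths)): i % 20 != 0 → append to train_audio else to val_audio;
-- then return train_audio if mode == "train" else val_audio.  (paths[i] is always in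
-- range here, so it is ported with pyGetD.)
def split_val_train (paths : List String) (mode : String) : List String :=
  let r : List String × List String :=
    (PySem.List.pyRange 0 (PySem.List.len paths) 1).foldl
      (fun acc i =>
        if PySem.Int.mod i 20 ≠ 0 then (acc.1 ++ [PySem.List.pyGetD paths i ""], acc.2)
        else (acc.1, acc.2 ++ [PySem.List.pyGetD paths i ""]))
      ([], [])
  if mode == "train" then r.1 else r.2

-- ===== PORT B =====
def split_val_train_alt (paths : List String) (mode : String) : List String :=
  if mode == "train" then
    ((PySem.List.enumerate paths 0).filter (fun p => PySem.Int.mod p.1 20 != 0)).map (·.2)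
  else
    (PySem.List.slice? paths none none 20).getD []

-- ===== PRECONDITION & SPEC =====
def Spec_split_val_train (paths : List String) (mode : String) (out : List String) : Prop := out = split_val_train_alt paths mode
instance (paths : List String) (mode : String) (out : List String) : Decidable (Spec_split_val_train paths mode out) := by unfold Spec_split_val_train; infer_instance

-- ===== CLAIM (what is proved, stated in full; the proofs are below) =====
def Claim_equal_split_val_train : Prop := ∀ (paths : List String) (mode : String), Dom_split_val_train paths mode → Spec_split_val_train paths mode (split_val_train paths mode)

-- ===== LEMMAS AND PROOFS =====

-- A's loop splits any (index, value) list into the two filter projections.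
theorem foldl_split (l : List (Int × String)) (t v : List String) :
    l.foldl
      (fun acc p =>
        if p.1 % 20 ≠ 0 then (acc.1 ++ [p.2], acc.2)
        else (acc.1, acc.2 ++ [p.2]))
      (t, v)
    = (t ++ (l.filter (fun p => p.1 % 20 != 0)).map (·.2),
       v ++ (l.filter (fun p => p.1 % 20 == 0)).map (·.2)) := by
  induction l generalizing t v with
  | nil => simp
  | cons x xs ih =>
      rw [List.foldl_cons, ih, List.filter_cons, List.filter_cons]
      by_cases h : x.1 % 20 = 0 <;> simp [h]

-- A's fold over range(len(paths)) is the fold over enumerate(paths).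
theorem fold_enumerate (paths : List String) (f : (List String × List String) → (Int × String) → (List String × List String)) :
    (PySem.List.pyRange 0 (PySem.List.len paths) 1).foldl
      (fun acc i => f acc (i, PySem.List.pyGetD paths i ""))
      ([], [])
    = (PySem.List.enumerate paths 0).foldl f ([], []) := by
  rw [PySem.List.enumerate_eq_map_pyRange (d := ""), List.foldl_map]

-- Indices: filtering range n to multiples of 20 is mapping (20 * .) over range of the ceiling.
theorem range_filter_mul20 (n : Nat) :
    (List.range n).filter (fun k => k % 20 == 0)
    = (List.range ((n + 19) / 20)).map (fun m => 20 * m) := by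
  induction n with
  | zero => simp
  | succ n ih =>
      rw [List.range_succ, List.filter_append]
      by_cases h : n % 20 = 0
      · have h1 : (n + 1 + 19) / 20 = (n + 19) / 20 + 1 := by omega
        have h2 : 20 * ((n + 19) / 20) = n := by omega
        rw [h1, List.range_succ, List.map_append, ih]
        simp [h, h2]
      · have h1 : (n + 1 + 19) / 20 = (n + 19) / 20 := by omega
        rw [h1, ih]
        simp [h]

-- filterMap of in-range lookups is a map of pyGetD.
theorem filterMap_range_get (xs : List String) (c : Nat) (hc : ∀ k, k < c → 20 * k < xs.length) :
    (List.range c).filterMap (fun (k : Nat) => xs[(0 + 20 * (k : Int)).toNat]?)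
    = (List.range c).map (fun m => PySem.List.pyGetD xs ((20 * m : Nat) : Int) "") := by
  induction c with
  | zero => simp
  | succ c ih =>
      rw [List.range_succ, List.filterMap_append, List.map_append,
          ih (fun k hk => hc k (Nat.lt_succ_of_lt hk))]
      have hlt : 20 * c < xs.length := hc c (Nat.lt_succ_self c)
      have h2 : ((0 : Int) + 20 * (c : Int)).toNat = 20 * c := by omega
      have h3 : xs[((0 : Int) + 20 * (c : Int)).toNat]? = some (xs[20 * c]'hlt) := by
        rw [h2]; exact List.getElem?_eq_getElem hlt
      have h4 : PySem.List.pyGetD xs ((20 * c : Nat) : Int) "" = xs[20 * c]'hlt := by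
        rw [PySem.List.pyGetD_natCast, List.getD_eq_getElem?_getD,
            List.getElem?_eq_getElem hlt, Option.getD_some]
      simp only [List.filterMap_cons, List.filterMap_nil, h3, List.map_cons, List.map_nil, h4]

-- slice? with step 20 evaluated to a map over range of the ceiling.
theorem slice20_eq (xs : List String) :
    PySem.List.slice? xs none none 20
    = some ((List.range ((xs.length + 19) / 20)).map
        (fun m => PySem.List.pyGetD xs ((20 * m : Nat) : Int) "")) := by
  have key : PySem.List.slice? xs none none 20
      = some ((List.range ((xs.length + 19) / 20)).filterMap
          (fun (k : Nat) => xs[(0 + 20 * (k : Int)).toNat]?)) := by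
    unfold PySem.List.slice? PySem.List.sliceIndices
    norm_num
    have hcnt : (if 0 < xs.length then (((xs.length : Int) + 20 - 1) / 20).toNat else 0)
        = (xs.length + 19) / 20 := by split <;> omega
    rw [hcnt]
  rw [key, filterMap_range_get xs _ (fun k hk => by omega)]

-- val branch: filter of enumerate equals the stride slice.
theorem val_eq (xs : List String) :
    ((PySem.List.enumerate xs 0).filter (fun p => p.1 % 20 == 0)).map (·.2)
    = (PySem.List.slice? xs none none 20).getD [] := by
  rw [PySem.List.enumerate_eq_map_pyRange (d := ""), slice20_eq, Option.getD_some,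
      PySem.List.pyRange_one, List.filter_map, List.map_map]
  have hlen : (((PySem.List.len xs) - 0).toNat) = xs.length := by
    simp [PySem.List.len_eq]
  rw [hlen, List.filter_map, List.map_map]
  have hp : (((fun (p : Int × String) => p.1 % 20 == 0) ∘ (fun j => (j, PySem.List.pyGetD xs j ""))) ∘ (fun (k : Nat) => (0 : Int) + k))
      = (fun (k : Nat) => k % 20 == 0) := by
    funext k
    have h0 : ((0 : Int) + k) % 20 = ((k % 20 : Nat) : Int) := by omega
    simp only [Function.comp_apply, h0]
    simp
    omega
  rw [hp, range_filter_mul20, List.map_map]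
  apply List.map_congr_left
  intro m _
  simp [Function.comp]

-- ===== VERDICT (by name: the statement is the Claim_ definition above) =====
theorem split_val_train_spec : Claim_equal_split_val_train := by
  intro paths mode _
  unfold Spec_split_val_train split_val_train split_val_train_alt
  simp only [PySem.Int.mod_eq_emod_of_pos (by norm_num : (0:Int) < 20)]
  rw [fold_enumerate paths
        (fun acc p => if p.1 % 20 ≠ 0 then (acc.1 ++ [p.2], acc.2) else (acc.1, acc.2 ++ [p.2])),
      foldl_split]
  by_cases h : (mode == "train") = true
  · simp [h]
  · simp [h, val_eq]
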